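-- pv_equiv track=rewrite | github.com/restran/hydrogen | utils/__init__.py | get_raw_plain_text
-- ===== SOURCE A (Python) =====
-- import string
--
-- def get_raw_plain_text(raw_data, decoded_data):
--     """
--     因为密文中可能包含数字，符合等各种非字母的字符，一些解密的算法是不考虑这些
--     在输出明文的时候，要跟这些符合，按要原来的顺序还原回来
--     :param raw_data:
--     :param decoded_data:
--     :return:
--     """
--     index = 0
--     plain = []
--     for i, c in enumerate(raw_data):
--         if c in string.ascii_lowercase:
--             new_c = decoded_data[index].lower()
--             index += 1
--         elif c in string.ascii_uppercase:
--             new_c = decoded_data[index].upper()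
--             index += 1
--         else:
--             new_c = c
--
--         plain.append(new_c)
--
--     return ''.join(plain)
-- ===== SOURCE B (Python) =====
-- import re
--
-- def get_raw_plain_text(raw_data, decoded_data):
--     i = [0]
--
--     def repl(m):
--         ch = decoded_data[i[0]]
--         i[0] += 1
--         return ch.lower() if m.group().islower() else ch.upper()
--
--     return re.sub(r'[a-zA-Z]', repl, raw_data)
-- ===== Notes on version B (the rewrite author's own statement) =====
-- stated objective: idiomatic
-- what changed: Replaced A's manual enumerate loop with index counter and list accumulator by a single re.sub over [a-zA-Z] whose replacement closure consumes decoded_data via a counter, leaving non-letters untouched automatically.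
import Mathlib
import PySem

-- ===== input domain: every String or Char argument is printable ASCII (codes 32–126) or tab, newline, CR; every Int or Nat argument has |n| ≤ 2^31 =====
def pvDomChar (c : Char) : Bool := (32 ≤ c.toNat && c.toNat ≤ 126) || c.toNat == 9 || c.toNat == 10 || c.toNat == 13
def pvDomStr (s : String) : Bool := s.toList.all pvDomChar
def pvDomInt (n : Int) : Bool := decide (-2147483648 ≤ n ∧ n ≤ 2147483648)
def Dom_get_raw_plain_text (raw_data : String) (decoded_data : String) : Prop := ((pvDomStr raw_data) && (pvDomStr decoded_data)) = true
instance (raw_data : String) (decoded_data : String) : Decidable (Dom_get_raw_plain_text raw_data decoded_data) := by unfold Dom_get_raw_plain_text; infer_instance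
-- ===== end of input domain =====

-- B replaces A's manual index/accumulator loop by a regex substitution over the letters
-- with a closure-held counter (objective: idiomatic; same cost).

-- ===== PORT A =====
-- 'c in string.ascii_lowercase' for a single char ≡ 'a' ≤ c ≤ 'z' (exact: raw chars are single chars).
-- decoded_data[index] is ported with pyGetD; the IndexError case (index out of range) is excluded by Pre_.
def pvStepA (dec : List Char) (st : Int × List Char) (c : Char) : Int × List Char :=
  if 'a' ≤ c ∧ c ≤ 'z' then
    (st.1 + 1, st.2 ++ [PySem.Chars.lowerChar (PySem.List.pyGetD dec st.1 '?')])
  else if 'A' ≤ c ∧ c ≤ 'Z' then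
    (st.1 + 1, st.2 ++ [PySem.Chars.upperChar (PySem.List.pyGetD dec st.1 '?')])
  else
    (st.1, st.2 ++ [c])

def get_raw_plain_text (raw_data : String) (decoded_data : String) : String :=
  String.mk (raw_data.toList.foldl (pvStepA decoded_data.toList) ((0 : Int), ([] : List Char))).2

-- ===== PORT B =====
-- re.sub(r'[a-zA-Z]', repl, raw_data) with counter i: a left-to-right scan that rewrites each
-- letter from decoded_data[i] (case keyed off the matched char) and copies everything else.
def pvSubB (dec : List Char) : Nat → List Char → List Char
  | _, [] => []
  | i, c :: cs =>
    if 'a' ≤ c ∧ c ≤ 'z' then PySem.Chars.lowerChar (dec.getD i '?') :: pvSubB dec (i + 1) cs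
    else if 'A' ≤ c ∧ c ≤ 'Z' then PySem.Chars.upperChar (dec.getD i '?') :: pvSubB dec (i + 1) cs
    else c :: pvSubB dec i cs

def get_raw_plain_text_alt (raw_data : String) (decoded_data : String) : String :=
  String.mk (pvSubB decoded_data.toList 0 raw_data.toList)

-- ===== PRECONDITION & SPEC =====
-- Pre_ excludes exactly the inputs where Python A raises IndexError (decoded_data shorter than
-- the number of ASCII letters in raw_data); Python B raises IndexError there too.
def Pre_get_raw_plain_text (raw_data : String) (decoded_data : String) : Prop :=
  raw_data.toList.countP (fun c => ('a' ≤ c ∧ c ≤ 'z') ∨ ('A' ≤ c ∧ c ≤ 'Z')) ≤ decoded_data.toList.length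
instance (raw_data : String) (decoded_data : String) : Decidable (Pre_get_raw_plain_text raw_data decoded_data) := by
  unfold Pre_get_raw_plain_text; infer_instance

def pvWitness_get_raw_plain_text : String × String := ("Ab c!", "xYz")

def Spec_get_raw_plain_text (raw_data : String) (decoded_data : String) (out : String) : Prop := out = get_raw_plain_text_alt raw_data decoded_data
instance (raw_data : String) (decoded_data : String) (out : String) : Decidable (Spec_get_raw_plain_text raw_data decoded_data out) := by unfold Spec_get_raw_plain_text; infer_instance

-- ===== CLAIM (what is proved, stated in full; the proofs are below) =====
def Claim_equal_get_raw_plain_text : Prop := ∀ (raw_data : String) (decoded_data : String), Dom_get_raw_plain_text raw_data decoded_data → Pre_get_raw_plain_text raw_data decoded_data → Spec_get_raw_plain_text raw_data decoded_data (get_raw_plain_text raw_data decoded_data)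

-- ===== LEMMAS AND PROOFS =====

-- Loop invariant: A's fold from counter i with accumulator acc appends exactly B's scan from i.
theorem pvFold_eq_sub (dec : List Char) (raw : List Char) :
    ∀ (i : Nat) (acc : List Char),
      (raw.foldl (pvStepA dec) ((i : Int), acc)).2 = acc ++ pvSubB dec i raw := by
  induction raw with
  | nil => intro i acc; simp [pvSubB]
  | cons c cs ih =>
    intro i acc
    simp only [List.foldl_cons, pvStepA, pvSubB]
    split_ifs with h1 h2
    · rw [show (i : Int) + 1 = ((i + 1 : Nat) : Int) by push_cast; ring]
      rw [ih (i + 1)]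
      simp [PySem.List.pyGetD_natCast]
    · rw [show (i : Int) + 1 = ((i + 1 : Nat) : Int) by push_cast; ring]
      rw [ih (i + 1)]
      simp [PySem.List.pyGetD_natCast]
    · rw [ih i]
      simp

-- ===== VERDICT (by name: the statement is the Claim_ definition above) =====
theorem get_raw_plain_text_spec : Claim_equal_get_raw_plain_text := by
  intro raw dec _ _
  unfold Spec_get_raw_plain_text get_raw_plain_text get_raw_plain_text_alt
  have h := pvFold_eq_sub dec.toList raw.toList 0 []
  norm_num at h
  rw [h]
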